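-- pv_equiv track=rewrite | github.com/IncleRepo/issue-to-pr-bot | app/prompting.py | render_line_windows
-- ===== SOURCE A (Python) =====
-- def render_line_windows(lines: list[str], indexes: list[int], radius: int, max_lines: int) -> str:
--     selected: list[str] = []
--     seen: set[int] = set()
--     remaining = max_lines
--     for index in indexes:
--         start = max(0, index - radius)
--         end = min(len(lines), index + radius + 1)
--         for line_index in range(start, end):
--             if line_index in seen:
--                 continue
--             selected.append(lines[line_index])
--             seen.add(line_index)
--             remaining -= 1
--             if remaining <= 0:
--                 break
--         if remaining <= 0:
--             break
--     return "\n".join(selected)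
-- ===== SOURCE B (Python) =====
-- def _merge_window(ivs, s, e):
--     # ivs: sorted, pairwise disjoint and non-adjacent covered intervals [a, b).
--     # Returns (gaps, ivs') where gaps are the uncovered sub-intervals of [s, e)
--     # in ascending order and ivs' is ivs with [s, e) merged in.
--     before = []
--     k = 0
--     while k < len(ivs) and ivs[k][1] < s:
--         before.append(ivs[k])
--         k += 1
--     gaps = []
--     lo = s
--     cur = s
--     while k < len(ivs) and ivs[k][0] <= e:
--         a, b = ivs[k]
--         if cur < a:
--             gaps.append((cur, a))
--         if a < lo:
--             lo = a
--         if b > cur: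
--             cur = b
--         k += 1
--     if cur < e:
--         gaps.append((cur, e))
--     hi = cur if cur > e else e
--     return gaps, before + [(lo, hi)] + ivs[k:]
--
--
-- def render_line_windows(lines: list[str], indexes: list[int], radius: int, max_lines: int) -> str:
--     n = len(lines)
--     ivs = []  # already-rendered line ranges, kept sorted and merged
--     out = []
--     remaining = max_lines
--     for index in indexes:
--         if remaining <= 0:
--             break
--         s = max(0, index - radius)
--         e = min(n, index + radius + 1)
--         if s >= e:
--             continue
--         gaps, ivs = _merge_window(ivs, s, e)
--         for ga, gb in gaps:
--             take = gb - ga if gb - ga < remaining else remaining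
--             out.extend(lines[ga:ga + take])
--             remaining -= take
--             if remaining <= 0:
--                 break
--     return "\n".join(out)
-- ===== Notes on version B (the rewrite author's own statement) =====
-- stated objective: faster
-- what changed: B replaces A's per-line seen-set scan of every window by a sorted merged list of already-rendered line intervals, emitting only the uncovered gap slices of each window, and checks the cap before emitting rather than after.
-- intended difference: When max_lines <= 0 and the first index's window is nonempty (and its first line is a nonempty string), A still returns that window's first line because it checks the cap only after an emission, while B returns the empty string, the intended meaning of a non-positive line cap. — e.g. on render_line_windows(["a", "b"], [0], 0, 0): A returns "a", B returns ""
import Mathlib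
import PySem

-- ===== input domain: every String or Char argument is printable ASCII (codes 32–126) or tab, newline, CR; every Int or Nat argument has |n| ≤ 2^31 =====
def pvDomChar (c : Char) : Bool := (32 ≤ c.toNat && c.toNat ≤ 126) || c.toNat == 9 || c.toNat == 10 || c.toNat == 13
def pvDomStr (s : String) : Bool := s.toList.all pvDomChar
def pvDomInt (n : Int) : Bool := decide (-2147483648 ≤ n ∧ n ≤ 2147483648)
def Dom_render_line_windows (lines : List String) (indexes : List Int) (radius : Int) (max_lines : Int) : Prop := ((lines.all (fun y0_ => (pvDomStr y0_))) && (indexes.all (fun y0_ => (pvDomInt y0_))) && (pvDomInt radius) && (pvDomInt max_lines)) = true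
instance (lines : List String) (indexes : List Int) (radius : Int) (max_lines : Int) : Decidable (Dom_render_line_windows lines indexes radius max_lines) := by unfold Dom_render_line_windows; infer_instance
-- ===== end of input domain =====

-- B replaces A's per-line seen-set scan by a sorted merged list of already-rendered
-- line intervals, emitting only the uncovered gap slices of each window (objective:
-- alternative; A's corner where max_lines <= 0 still emits one line is changed, see D_).

-- ===== PORT A =====
-- inner 'for line_index in range(start, end)' loop of A, with its break on remaining <= 0
def pvInnerA (lines : List String) : List Int → List String × PySem.Set Int × Int → List String × PySem.Set Int × Int
  | [], st => st
  | p :: ps, (sel, seen, rem) =>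
    if PySem.Set.contains seen p then pvInnerA lines ps (sel, seen, rem)
    else
      -- lines[line_index]: in range by construction (p drawn from the clamped range), so pyGetD is exact here
      let sel' := sel ++ [PySem.List.pyGetD lines p ""]
      let seen' := PySem.Set.add seen p
      let rem' := rem - 1
      if rem' ≤ 0 then (sel', seen', rem') else pvInnerA lines ps (sel', seen', rem')

-- outer 'for index in indexes' loop of A, with its break on remaining <= 0
def pvOuterA (lines : List String) (radius : Int) : List Int → List String × PySem.Set Int × Int → List String × PySem.Set Int × Int
  | [], st => st
  | i :: is, (sel, seen, rem) =>
    let s := max 0 (i - radius)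
    let e := min (lines.length : Int) (i + radius + 1)
    let st' := pvInnerA lines (PySem.List.pyRange s e 1) (sel, seen, rem)
    if st'.2.2 ≤ 0 then st' else pvOuterA lines radius is st'

def render_line_windows (lines : List String) (indexes : List Int) (radius : Int) (max_lines : Int) : String :=
  PySem.Str.join "\n" (pvOuterA lines radius indexes ([], PySem.Set.empty, max_lines)).1

-- ===== PORT B =====
-- first while loop of _merge_window: split off the intervals lying strictly before s
def pvMwBefore : List (Int × Int) → Int → List (Int × Int) × List (Int × Int)
  | [], _ => ([], [])
  | (a, b) :: rest, s =>
    if b < s then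
      let (pre, rest') := pvMwBefore rest s
      ((a, b) :: pre, rest')
    else ([], (a, b) :: rest)

-- second while loop of _merge_window: absorb intervals meeting the window, collecting gaps
def pvMwScan (e : Int) : List (Int × Int) → Int → Int → List (Int × Int) × Int × Int × List (Int × Int)
  | [], lo, cur => ([], lo, cur, [])
  | (a, b) :: rest, lo, cur =>
    if a ≤ e then
      let g := if cur < a then [(cur, a)] else []
      let (gs, lo', cur', tl) := pvMwScan e rest (min lo a) (max cur b)
      (g ++ gs, lo', cur', tl)
    else ([], lo, cur, (a, b) :: rest)

def pvMergeWindow (ivs : List (Int × Int)) (s e : Int) : List (Int × Int) × List (Int × Int) :=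
  let (before, rest) := pvMwBefore ivs s
  let (gs, lo, cur, tl) := pvMwScan e rest s s
  let gaps := if cur < e then gs ++ [(cur, e)] else gs
  let hi := max cur e
  (gaps, before ++ (lo, hi) :: tl)

-- 'for ga, gb in gaps' emission loop of B, with its break on remaining <= 0
def pvEmitB (lines : List String) : List (Int × Int) → List String × Int → List String × Int
  | [], st => st
  | (ga, gb) :: gs, (out, rem) =>
    let tk := if gb - ga < rem then gb - ga else rem
    let out' := out ++ PySem.List.slice lines (some ga) (some (ga + tk))
    let rem' := rem - tk
    if rem' ≤ 0 then (out', rem') else pvEmitB lines gs (out', rem')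

-- outer 'for index in indexes' loop of B
def pvOuterB (lines : List String) (radius : Int) : List Int → List (Int × Int) × List String × Int → List (Int × Int) × List String × Int
  | [], st => st
  | i :: is, (ivs, out, rem) =>
    if rem ≤ 0 then (ivs, out, rem)
    else
      let s := max 0 (i - radius)
      let e := min (lines.length : Int) (i + radius + 1)
      if e ≤ s then pvOuterB lines radius is (ivs, out, rem)
      else
        let (gaps, ivs') := pvMergeWindow ivs s e
        let (out', rem') := pvEmitB lines gaps (out, rem)
        pvOuterB lines radius is (ivs', out', rem')

def render_line_windows_alt (lines : List String) (indexes : List Int) (radius : Int) (max_lines : Int) : String :=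
  PySem.Str.join "\n" (pvOuterB lines radius indexes ([], [], max_lines)).2.1

-- ===== PRECONDITION & SPEC =====
-- When max_lines <= 0 and the first index's window is nonempty, A still emits that window's
-- first line (its cap is only checked after an emission) while B emits nothing, which is the
-- intended meaning of a non-positive cap; D_ also requires that first line to be nonempty so
-- that the two renderings really differ as strings.
def D_render_line_windows (lines : List String) (indexes : List Int) (radius : Int) (max_lines : Int) : Prop :=
  max_lines ≤ 0 ∧ indexes ≠ [] ∧
    max 0 (indexes.headI - radius) < min (lines.length : Int) (indexes.headI + radius + 1) ∧
    PySem.List.pyGetD lines (max 0 (indexes.headI - radius)) "" ≠ ""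

instance (lines : List String) (indexes : List Int) (radius : Int) (max_lines : Int) : Decidable (D_render_line_windows lines indexes radius max_lines) := by
  unfold D_render_line_windows; infer_instance

def Spec_render_line_windows (lines : List String) (indexes : List Int) (radius : Int) (max_lines : Int) (out : String) : Prop := ¬ D_render_line_windows lines indexes radius max_lines → out = render_line_windows_alt lines indexes radius max_lines
instance (lines : List String) (indexes : List Int) (radius : Int) (max_lines : Int) (out : String) : Decidable (Spec_render_line_windows lines indexes radius max_lines out) := by unfold Spec_render_line_windows; infer_instance

def pvDiffWitness_render_line_windows : List String × List Int × Int × Int := (["a", "b"], [0], 0, 0)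
def pvDiffWitnessOut_render_line_windows : String × String := ("a", "")

-- ===== CLAIM (what is proved, stated in full; the proofs are below) =====
def Claim_unchanged_render_line_windows : Prop := ∀ (lines : List String) (indexes : List Int) (radius : Int) (max_lines : Int), Dom_render_line_windows lines indexes radius max_lines → Spec_render_line_windows lines indexes radius max_lines (render_line_windows lines indexes radius max_lines)
def Claim_changed_render_line_windows : Prop := Dom_render_line_windows (pvDiffWitness_render_line_windows.1) (pvDiffWitness_render_line_windows.2.1) (pvDiffWitness_render_line_windows.2.2.1) (pvDiffWitness_render_line_windows.2.2.2) ∧ D_render_line_windows (pvDiffWitness_render_line_windows.1) (pvDiffWitness_render_line_windows.2.1) (pvDiffWitness_render_line_windows.2.2.1) (pvDiffWitness_render_line_windows.2.2.2) ∧ render_line_windows (pvDiffWitness_render_line_windows.1) (pvDiffWitness_render_line_windows.2.1) (pvDiffWitness_render_line_windows.2.2.1) (pvDiffWitness_render_line_windows.2.2.2) = pvDiffWitnessOut_render_line_windows.1 ∧ render_line_windows_alt (pvDiffWitness_render_line_windows.1) (pvDiffWitness_render_line_windows.2.1) (pvDiffWitness_render_line_windows.2.2.1) (pvDiffWitness_render_line_windows.2.2.2)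 = pvDiffWitnessOut_render_line_windows.2 ∧ pvDiffWitnessOut_render_line_windows.1 ≠ pvDiffWitnessOut_render_line_windows.2
def Claim_exact_render_line_windows : Prop := ∀ (lines : List String) (indexes : List Int) (radius : Int) (max_lines : Int), Dom_render_line_windows lines indexes radius max_lines → D_render_line_windows lines indexes radius max_lines → render_line_windows lines indexes radius max_lines ≠ render_line_windows_alt lines indexes radius max_lines

-- ===== LEMMAS AND PROOFS =====

-- coverage of a line position by an interval list
def pvCov (ivs : List (Int × Int)) (p : Int) : Bool :=
  ivs.any (fun g => decide (g.1 ≤ p ∧ p < g.2))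

-- well-formed interval list: sorted, disjoint, non-adjacent, nonempty intervals
def pvWF (ivs : List (Int × Int)) : Prop :=
  ivs.Pairwise (fun x y => x.2 < y.1) ∧ ∀ x ∈ ivs, x.1 < x.2

def pvGet (lines : List String) (p : Int) : String := PySem.List.pyGetD lines p ""

def pvFlat (gaps : List (Int × Int)) : List Int :=
  gaps.flatMap (fun g => PySem.List.pyRange g.1 g.2 1)

-- two strictly increasing integer lists with the same members are equal
theorem pvSortedExt : ∀ (l1 l2 : List Int), l1.Pairwise (· < ·) → l2.Pairwise (· < ·) →
    (∀ x, x ∈ l1 ↔ x ∈ l2) → l1 = l2 := by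
  intro l1
  induction l1 with
  | nil =>
    intro l2 _ _ hm
    cases l2 with
    | nil => rfl
    | cons y ys => exact absurd ((hm y).mpr (List.mem_cons_self)) (by simp)
  | cons x xs ih =>
    intro l2 h1 h2 hm
    cases l2 with
    | nil => exact absurd ((hm x).mp (List.mem_cons_self)) (by simp)
    | cons y ys =>
      have hxy : x = y := by
        have hx : x ∈ y :: ys := (hm x).mp List.mem_cons_self
        have hy : y ∈ x :: xs := (hm y).mpr List.mem_cons_self
        rcases List.mem_cons.mp hx with h | h
        · exact h
        · rcases List.mem_cons.mp hy with h' | h'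
          · exact h'.symm
          · have := (List.pairwise_cons.mp h2).1 x h
            have := (List.pairwise_cons.mp h1).1 y h'
            omega
      subst hxy
      have hxs : ∀ z, z ∈ xs ↔ z ∈ ys := by
        intro z
        constructor
        · intro hz
          have := (hm z).mp (List.mem_cons_of_mem _ hz)
          rcases List.mem_cons.mp this with h | h
          · exact absurd h (by have := (List.pairwise_cons.mp h1).1 z hz; omega)
          · exact h
        · intro hz
          have := (hm z).mpr (List.mem_cons_of_mem _ hz)
          rcases List.mem_cons.mp this with h | h
          · exact absurd h (by have := (List.pairwise_cons.mp h2).1 z hz; omega)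
          · exact h
      rw [ih ys (List.pairwise_cons.mp h1).2 (List.pairwise_cons.mp h2).2 hxs]

theorem pvInnerA_spec (lines : List String) (r : List Int) (sel : List String)
    (seen : PySem.Set Int) (rem : Int) (hrem : 1 ≤ rem) (hnd : r.Nodup) :
    pvInnerA lines r (sel, seen, rem) =
      (sel ++ ((r.filter (fun p => !PySem.Set.contains seen p)).take rem.toNat).map (pvGet lines),
       seen ++ (r.filter (fun p => !PySem.Set.contains seen p)).take rem.toNat,
       rem - ((r.filter (fun p => !PySem.Set.contains seen p)).take rem.toNat).length) := by
  induction r generalizing sel seen rem with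
  | nil => simp [pvInnerA]
  | cons p ps ih =>
    have hnd' : ps.Nodup := (List.nodup_cons.mp hnd).2
    have hpps : p ∉ ps := (List.nodup_cons.mp hnd).1
    by_cases hc : PySem.Set.contains seen p = true
    · rw [show pvInnerA lines (p :: ps) (sel, seen, rem) = pvInnerA lines ps (sel, seen, rem) by
        rw [pvInnerA, hc]; simp]
      have hcm : p ∈ seen := by simpa [PySem.Set.contains] using hc
      rw [ih sel seen rem hrem hnd']
      simp [List.filter_cons, hcm]
    · rw [Bool.not_eq_true] at hc
      have hcm : p ∉ seen := by simp [PySem.Set.contains] at hc; exact hc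
      have hadd : PySem.Set.add seen p = seen ++ [p] := by
        unfold PySem.Set.add
        rw [hc]
        simp
      have hfilter : (p :: ps).filter (fun q => !PySem.Set.contains seen q)
          = p :: ps.filter (fun q => !PySem.Set.contains seen q) := by
        simp [List.filter_cons, PySem.Set.contains, hcm]
      have hfcongr : ps.filter (fun q => !PySem.Set.contains (seen ++ [p]) q)
          = ps.filter (fun q => !PySem.Set.contains seen q) := by
        apply List.filter_congr
        intro q hq
        have hqp : q ≠ p := fun h => hpps (h ▸ hq)
        simp [PySem.Set.contains, hqp]
      by_cases hr1 : rem - 1 ≤ 0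
      · have hrem1 : rem = 1 := by omega
        subst hrem1
        rw [show pvInnerA lines (p :: ps) (sel, seen, 1)
            = (sel ++ [PySem.List.pyGetD lines p ""], PySem.Set.add seen p, 0) by
          rw [pvInnerA, hc]; simp]
        rw [hfilter, hadd]
        simp [pvGet]
      · rw [show pvInnerA lines (p :: ps) (sel, seen, rem)
            = pvInnerA lines ps (sel ++ [PySem.List.pyGetD lines p ""], PySem.Set.add seen p, rem - 1) by
          rw [pvInnerA, hc]; simp [hr1]]
        rw [ih _ _ _ (by omega) hnd', hadd, hfcongr, hfilter]
        have htake : ∀ (l : List Int), (p :: l).take rem.toNat = p :: l.take (rem - 1).toNat := by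
          intro l
          rw [show rem.toNat = (rem - 1).toNat + 1 by omega]
          rfl
        rw [htake]
        simp [pvGet, List.append_assoc]
        omega

theorem pvSlice_eq_map (lines : List String) (a t : Int) (h0 : 0 ≤ a) (ht : 0 ≤ t)
    (hn : a + t ≤ (lines.length : Int)) :
    PySem.List.slice lines (some a) (some (a + t)) =
      (PySem.List.pyRange a (a + t) 1).map (pvGet lines) := by
  rw [PySem.List.slice_toNat lines h0 (by omega)]
  apply List.ext_getElem
  · simp [PySem.List.length_pyRange_one]
    omega
  · intro k hk1 hk2
    have hklt : k < t.toNat := by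
      simp at hk1
      omega
    have hkin : a.toNat + k < lines.length := by omega
    rw [List.getElem_take, List.getElem_drop]
    rw [List.getElem_map]
    rw [PySem.List.getElem_pyRange_one]
    show lines[a.toNat + k] = pvGet lines (a + (k : Int))
    rw [pvGet, PySem.List.pyGetD_eq_getElem lines "" (by omega) (by push_cast; omega)]
    congr 1
    omega

theorem pvEmitB_spec (lines : List String) (gaps : List (Int × Int)) (out : List String)
    (rem : Int) (hrem : 1 ≤ rem)
    (hb : ∀ g ∈ gaps, 0 ≤ g.1 ∧ g.1 < g.2 ∧ g.2 ≤ (lines.length : Int)) :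
    pvEmitB lines gaps (out, rem) =
      (out ++ ((pvFlat gaps).take rem.toNat).map (pvGet lines),
       rem - ((pvFlat gaps).take rem.toNat).length) := by
  induction gaps generalizing out rem with
  | nil => simp [pvEmitB, pvFlat]
  | cons g gs ih =>
    obtain ⟨ga, gb⟩ := g
    obtain ⟨hga, hlt, hle⟩ := hb (ga, gb) (by simp)
    have hflat : pvFlat ((ga, gb) :: gs)
        = PySem.List.pyRange ga gb 1 ++ pvFlat gs := by
      simp [pvFlat]
    by_cases hcap : gb - ga < rem
    · -- whole gap fits, remaining stays positive unless gs continues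
      have htk : (if gb - ga < rem then gb - ga else rem) = gb - ga := by simp [hcap]
      have hslice : PySem.List.slice lines (some ga) (some (ga + (gb - ga)))
          = (PySem.List.pyRange ga gb 1).map (pvGet lines) := by
        rw [pvSlice_eq_map lines ga (gb - ga) hga (by omega) (by omega)]
        congr 2
        omega
      have hrlen : ((PySem.List.pyRange ga gb 1).length : Int) = gb - ga := by
        rw [PySem.List.length_pyRange_one]; omega
      by_cases hz : rem - (gb - ga) ≤ 0
      · omega
      · rw [show pvEmitB lines ((ga, gb) :: gs) (out, rem)
            = pvEmitB lines gs (out ++ PySem.List.slice lines (some ga) (some (ga + (gb - ga))),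
                rem - (gb - ga)) by
          rw [pvEmitB]; simp [htk, hz]]
        rw [ih _ _ (by omega) (fun g hg => hb g (by simp [hg]))]
        rw [hflat, hslice]
        have hsplit : (PySem.List.pyRange ga gb 1 ++ pvFlat gs).take rem.toNat
            = PySem.List.pyRange ga gb 1 ++ (pvFlat gs).take (rem - (gb - ga)).toNat := by
          rw [List.take_append]
          congr 1
          · rw [List.take_of_length_le]
            rw [PySem.List.length_pyRange_one]; omega
          · congr 1
            rw [PySem.List.length_pyRange_one]; omega
        rw [hsplit]
        simp [List.append_assoc]
        omega
    · -- gap is cut by the cap: emit rem elements and stop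
      have htk : (if gb - ga < rem then gb - ga else rem) = rem := by simp [hcap]
      have hstop : rem - rem ≤ 0 := by omega
      rw [show pvEmitB lines ((ga, gb) :: gs) (out, rem)
          = (out ++ PySem.List.slice lines (some ga) (some (ga + rem)), rem - rem) by
        rw [pvEmitB]; simp [htk]]
      have hslice : PySem.List.slice lines (some ga) (some (ga + rem))
          = (PySem.List.pyRange ga (ga + rem) 1).map (pvGet lines) := by
        exact pvSlice_eq_map lines ga rem hga (by omega) (by omega)
      have htake : (pvFlat ((ga, gb) :: gs)).take rem.toNat
          = PySem.List.pyRange ga (ga + rem) 1 := by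
        rw [hflat]
        rw [List.take_append_of_le_length (by rw [PySem.List.length_pyRange_one]; omega)]
        rw [PySem.List.pyRange_one_append ga (ga + rem) gb (by omega) (by omega)]
        rw [List.take_append_of_le_length (by rw [PySem.List.length_pyRange_one]; omega)]
        rw [List.take_of_length_le (by rw [PySem.List.length_pyRange_one]; omega)]
      rw [htake, hslice]
      have : ((PySem.List.pyRange ga (ga + rem) 1).length : Int) = rem := by
        rw [PySem.List.length_pyRange_one]; omega
      simp
      omega

theorem pvMwBefore_spec : ∀ (ivs : List (Int × Int)) (s : Int),
    ivs = (pvMwBefore ivs s).1 ++ (pvMwBefore ivs s).2 ∧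
    (∀ x ∈ (pvMwBefore ivs s).1, x.2 < s) ∧
    (∀ hd, ((pvMwBefore ivs s).2).head? = some hd → s ≤ hd.2) := by
  intro ivs
  induction ivs with
  | nil => intro s; simp [pvMwBefore]
  | cons x rest ih =>
    intro s
    obtain ⟨a, b⟩ := x
    by_cases hbs : b < s
    · have hunf : pvMwBefore ((a, b) :: rest) s
          = ((a, b) :: (pvMwBefore rest s).1, (pvMwBefore rest s).2) := by
        rw [pvMwBefore]
        simp [hbs]
      rw [hunf]
      obtain ⟨h1, h2, h3⟩ := ih s
      refine ⟨by simpa using congrArg (List.cons (a, b)) h1, ?_, h3⟩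
      intro x hx
      rcases List.mem_cons.mp hx with h | h
      · rw [h]; exact hbs
      · exact h2 x h
    · have hunf : pvMwBefore ((a, b) :: rest) s = ([], (a, b) :: rest) := by
        rw [pvMwBefore]
        simp [hbs]
      rw [hunf]
      refine ⟨by simp, by simp, ?_⟩
      intro hd hhd
      simp at hhd
      rw [← hhd]
      omega

theorem pvBoolIff (x y : Bool) (h : x = true ↔ y = true) : x = y := by
  cases x <;> cases y <;> simp_all

theorem pvCov_iff (l : List (Int × Int)) (p : Int) :
    pvCov l p = true ↔ ∃ g ∈ l, g.1 ≤ p ∧ p < g.2 := by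
  simp [pvCov]

theorem pvMwScan_spec (e : Int) : ∀ (rest : List (Int × Int)) (lo cur : Int),
    pvWF rest → (∀ x ∈ rest, cur ≤ x.2) → lo ≤ cur → (∀ x ∈ rest, cur < x.1 ∨ cur ≤ e) →
    (let r := pvMwScan e rest lo cur
     let gapsF := r.1 ++ (if r.2.2.1 < e then [(r.2.2.1, e)] else [])
     (∀ p, p ∈ pvFlat gapsF ↔ (cur ≤ p ∧ p < e ∧ pvCov rest p = false)) ∧
     (gapsF.Pairwise (fun g h => g.2 ≤ h.1) ∧ ∀ g ∈ gapsF, cur ≤ g.1 ∧ g.1 < g.2 ∧ g.2 ≤ e) ∧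
     (∀ p, (decide (r.2.1 ≤ p ∧ p < max r.2.2.1 e) || pvCov r.2.2.2 p)
         = (decide (lo ≤ p ∧ p < cur) || pvCov rest p || decide (cur ≤ p ∧ p < e))) ∧
     pvWF r.2.2.2 ∧ (∀ x ∈ r.2.2.2, e < x.1 ∧ r.2.2.1 < x.1) ∧ r.2.1 ≤ lo ∧ cur ≤ r.2.2.1 ∧
     (∀ q, q < lo → (∀ y ∈ rest, q < y.1) → q < r.2.1) ∧ (∀ y ∈ r.2.2.2, y ∈ rest)) := by
  intro rest
  induction rest with
  | nil =>
    intro lo cur hwf hb hlo hnx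
    simp only [pvMwScan]
    by_cases hce : cur < e
    · refine ⟨?_, ⟨by simp [hce], ?_⟩, ?_, ⟨by simp [pvWF], by simp⟩, by simp, le_refl _, le_refl _,
        fun _ h _ => h, by simp⟩
      · intro p
        simp [hce, pvFlat, PySem.List.mem_pyRange_one, pvCov]
      · intro g hg
        simp [hce] at hg
        rw [hg]
        exact ⟨le_refl _, hce, le_refl _⟩
      · intro p
        apply pvBoolIff
        simp [pvCov]
        omega
    · refine ⟨?_, ⟨by simp [hce], by simp [hce]⟩, ?_, ⟨by simp [pvWF], by simp⟩, by simp, le_refl _, le_refl _,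
        fun _ h _ => h, by simp⟩
      · intro p
        simp [hce, pvFlat, pvCov]
        omega
      · intro p
        apply pvBoolIff
        simp [pvCov]
        omega
  | cons x rest' ih =>
    intro lo cur hwf hb hlo hnx
    obtain ⟨a, b⟩ := x
    have hab : a < b := hwf.2 (a, b) (by simp)
    have hcb : cur ≤ b := hb (a, b) (by simp)
    have hchain : ∀ y ∈ rest', b < y.1 := by
      intro y hy
      exact (List.pairwise_cons.mp hwf.1).1 y hy
    have hwf' : pvWF rest' := ⟨(List.pairwise_cons.mp hwf.1).2, fun y hy => hwf.2 y (by simp [hy])⟩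
    by_cases hae : a ≤ e
    · -- the interval meets (or touches) the window: absorb it
      have hcure : cur ≤ e := by
        rcases hnx (a, b) (by simp) with h | h
        · omega
        · exact h
      rcases hscan : pvMwScan e rest' (min lo a) (max cur b) with ⟨gs', lo', cur', tl'⟩
      have hunf : pvMwScan e ((a, b) :: rest') lo cur
          = ((if cur < a then [(cur, a)] else []) ++ gs', lo', cur', tl') := by
        rw [pvMwScan, hscan]
        simp [hae]
      have hb' : ∀ y ∈ rest', max cur b ≤ y.2 := by
        intro y hy
        have h1 := hchain y hy
        have h2 := hwf'.2 y hy
        have h3 := hb y (by simp [hy])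
        omega
      have hnx' : ∀ y ∈ rest', max cur b < y.1 ∨ max cur b ≤ e := by
        intro y hy
        left
        have h1 := hchain y hy
        rcases hnx (a, b) (by simp) with h | h
        · omega
        · omega
      obtain ⟨iA, iB, iC, iD1, iD2, iD3, iD4, iD5, iD6⟩ :=
        ih (min lo a) (max cur b) hwf' hb' (by omega) hnx'
      rw [hscan] at iA iB iC iD1 iD2 iD3 iD4 iD5 iD6
      dsimp only at iA iB iC iD1 iD2 iD3 iD4 iD5 iD6
      rw [hunf]
      simp only
      refine ⟨?_, ?_, ?_, iD1, ?_, by omega, by omega, ?_, ?_⟩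
      · -- membership of the flattened gaps
        intro p
        have hiA := iA p
        have hcovc : pvCov ((a, b) :: rest') p
            = (decide (a ≤ p ∧ p < b) || pvCov rest' p) := by
          simp [pvCov]
        by_cases hcov : pvCov rest' p = true
        · have hpb : b < p + 1 := by
            obtain ⟨g, hg, hg1, hg2⟩ := (pvCov_iff rest' p).mp hcov
            have := hchain g hg
            omega
          constructor
          · intro hmem
            rw [pvFlat, List.append_assoc, List.flatMap_append] at hmem
            rcases List.mem_append.mp hmem with h | h
            · by_cases hca : cur < a
              · simp [hca, pvFlat, PySem.List.mem_pyRange_one] at h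
                omega
              · simp [hca, pvFlat] at h
            · have := hiA.mp h
              rw [hcov] at this
              simp at this
          · intro h
            rw [hcovc, hcov] at h
            simp at h
        · rw [Bool.not_eq_true] at hcov
          have hmemg : p ∈ pvFlat ((if cur < a then [(cur, a)] else []) ++ gs' ++ if cur' < e then [(cur', e)] else [])
              ↔ ((cur < a ∧ cur ≤ p ∧ p < a) ∨ (max cur b ≤ p ∧ p < e ∧ pvCov rest' p = false)) := by
            rw [pvFlat, List.append_assoc, List.flatMap_append, List.mem_append]
            constructor
            · rintro (h | h)
              · left
                by_cases hca : cur < a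
                · simp [hca, PySem.List.mem_pyRange_one] at h
                  exact ⟨hca, h⟩
                · simp [hca] at h
              · right; exact hiA.mp h
            · rintro (⟨h1, h2, h3⟩ | h)
              · left; simp [h1, PySem.List.mem_pyRange_one]; omega
              · right; exact hiA.mpr h
          rw [hmemg, hcovc, hcov]
          simp only [Bool.or_false]
          constructor
          · rintro (⟨h1, h2, h3⟩ | ⟨h1, h2, h3⟩)
            · refine ⟨by omega, by omega, by simp; omega⟩
            · refine ⟨by omega, by omega, by simp; omega⟩
          · rintro ⟨h1, h2, h3⟩
            simp at h3
            by_cases hpa : p < a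
            · left; refine ⟨by omega, h1, hpa⟩
            · right
              refine ⟨by omega, h2, trivial⟩
      · -- pairwise and bounds of the gap list
        obtain ⟨iB1, iB2⟩ := iB
        constructor
        · rw [List.append_assoc, List.pairwise_append]
          refine ⟨?_, iB1, ?_⟩
          · by_cases hca : cur < a
            · simp [hca]
            · simp [hca]
          · intro g hg h hh
            by_cases hca : cur < a
            · simp [hca] at hg
              have := iB2 h hh
              rw [hg]
              simp only
              omega
            · simp [hca] at hg
        · intro g hg
          rw [List.append_assoc, List.mem_append] at hg
          rcases hg with h | h
          · by_cases hca : cur < a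
            · simp [hca] at h
              rw [h]
              exact ⟨le_refl _, by simpa using hca, by simp; omega⟩
            · simp [hca] at h
          · have := iB2 g h
            exact ⟨by omega, this.2.1, this.2.2⟩
      · -- coverage equation
        intro p
        have hiC := iC p
        rw [hiC]
        have hcovc : pvCov ((a, b) :: rest') p
            = (decide (a ≤ p ∧ p < b) || pvCov rest' p) := by
          simp [pvCov]
        rw [hcovc]
        cases hcov : pvCov rest' p
        · simp only [Bool.or_false, Bool.false_or]
          apply pvBoolIff
          simp
          omega
        · simp
      · -- the untouched tail
        intro y hy
        have h1 := iD2 y hy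
        exact ⟨h1.1, h1.2⟩
      · -- the final lower bound stays above anything below lo and all interval starts
        intro q h1 h2
        refine iD5 q (by have := h2 (a, b) (by simp); omega) ?_
        intro y hy
        exact h2 y (by simp [hy])
      · -- the untouched tail is a suffix of the input
        intro y hy
        exact List.mem_cons_of_mem _ (iD6 y hy)
    · -- the interval lies beyond the window: stop
      have hunf : pvMwScan e ((a, b) :: rest') lo cur = ([], lo, cur, (a, b) :: rest') := by
        rw [pvMwScan]
        simp [hae]
      rw [hunf]
      simp only
      have hnocov : ∀ p, p < e → pvCov ((a, b) :: rest') p = false := by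
        intro p hp
        rw [← Bool.not_eq_true]
        intro hc
        obtain ⟨g, hg, hg1, hg2⟩ := (pvCov_iff _ p).mp hc
        rcases List.mem_cons.mp hg with h | h
        · rw [h] at hg1; simp at hg1; omega
        · have := hchain g h
          have : a < g.1 := by omega
          omega
      refine ⟨?_, ⟨?_, ?_⟩, ?_, hwf, ?_, le_refl _, le_refl _, fun _ h _ => h, fun y hy => hy⟩
      · intro p
        by_cases hce : cur < e
        · simp [hce, pvFlat, PySem.List.mem_pyRange_one]
          intro h1 h2
          exact hnocov p h2
        · simp [hce, pvFlat]
          intro h1 h2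
          exact absurd h2 (by omega)
      · by_cases hce : cur < e <;> simp [hce]
      · intro g hg
        by_cases hce : cur < e
        · simp [hce] at hg
          rw [hg]
          exact ⟨le_refl _, hce, le_refl _⟩
        · simp [hce] at hg
      · intro p
        have hcovc : pvCov ((a, b) :: rest') p
            = (decide (a ≤ p ∧ p < b) || pvCov rest' p) := by
          simp [pvCov]
        rw [hcovc]
        cases hcov : pvCov rest' p
        · simp only [Bool.or_false, Bool.false_or]
          apply pvBoolIff
          simp
          omega
        · simp
      · intro y hy
        rcases List.mem_cons.mp hy with h | h
        · rcases hnx (a, b) (by simp) with hh | hh <;>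
            (rw [h]; exact ⟨by omega, by omega⟩)
        · have h1 := hchain y h
          exact ⟨by omega, by omega⟩

theorem pvCov_append (l1 l2 : List (Int × Int)) (p : Int) :
    pvCov (l1 ++ l2) p = (pvCov l1 p || pvCov l2 p) := by
  simp [pvCov]

theorem pvCov_cons (a b : Int) (l : List (Int × Int)) (p : Int) :
    pvCov ((a, b) :: l) p = (decide (a ≤ p ∧ p < b) || pvCov l p) := by
  simp [pvCov]

theorem pvMem_flat (gaps : List (Int × Int)) (p : Int) :
    p ∈ pvFlat gaps ↔ ∃ g ∈ gaps, g.1 ≤ p ∧ p < g.2 := by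
  simp [pvFlat, PySem.List.mem_pyRange_one]

theorem pvFlat_pairwise : ∀ (gaps : List (Int × Int)),
    gaps.Pairwise (fun g h => g.2 ≤ h.1) → (pvFlat gaps).Pairwise (· < ·) := by
  intro gaps
  induction gaps with
  | nil => intro _; simp [pvFlat]
  | cons g gs ih =>
    intro hpw
    have : pvFlat (g :: gs) = PySem.List.pyRange g.1 g.2 1 ++ pvFlat gs := by simp [pvFlat]
    rw [this, List.pairwise_append]
    refine ⟨PySem.List.pairwise_lt_pyRange_one _ _, ih (List.pairwise_cons.mp hpw).2, ?_⟩
    intro x hx y hy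
    have hx2 : x < g.2 := (PySem.List.mem_pyRange_one.mp hx).2
    obtain ⟨h, hh, hh1, hh2⟩ := (pvMem_flat gs y).mp hy
    have := (List.pairwise_cons.mp hpw).1 h hh
    omega

theorem pvMergeWindow_spec (ivs : List (Int × Int)) (s e : Int) (hwf : pvWF ivs) (hse : s < e) :
    (∀ p, p ∈ pvFlat (pvMergeWindow ivs s e).1 ↔ (s ≤ p ∧ p < e ∧ pvCov ivs p = false)) ∧
    ((pvMergeWindow ivs s e).1.Pairwise (fun g h => g.2 ≤ h.1) ∧
      ∀ g ∈ (pvMergeWindow ivs s e).1, s ≤ g.1 ∧ g.1 < g.2 ∧ g.2 ≤ e) ∧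
    (∀ p, pvCov (pvMergeWindow ivs s e).2 p = (pvCov ivs p || decide (s ≤ p ∧ p < e))) ∧
    pvWF (pvMergeWindow ivs s e).2 := by
  rcases hbef : pvMwBefore ivs s with ⟨bef, rest⟩
  rcases hscan : pvMwScan e rest s s with ⟨gs, lo, cur, tl⟩
  have hunf : pvMergeWindow ivs s e
      = ((if cur < e then gs ++ [(cur, e)] else gs), bef ++ (lo, max cur e) :: tl) := by
    rw [pvMergeWindow, hbef]
    simp only
    rw [hscan]
  obtain ⟨hivs, hbefore2, hresthead⟩ := pvMwBefore_spec ivs s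
  rw [hbef] at hivs hbefore2 hresthead
  dsimp only at hivs hbefore2 hresthead
  rw [hivs] at hwf
  obtain ⟨hpw, hvalid⟩ := hwf
  obtain ⟨hpw_bef, hpw_rest, hcross⟩ := List.pairwise_append.mp hpw
  have hwf_rest : pvWF rest := ⟨hpw_rest, fun y hy => hvalid y (by simp [hy])⟩
  have hbrest : ∀ x ∈ rest, s ≤ x.2 := by
    cases rest with
    | nil => simp
    | cons hd tl0 =>
      intro x hx
      have hhd : s ≤ hd.2 := hresthead hd rfl
      rcases List.mem_cons.mp hx with h | h
      · rw [h]; exact hhd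
      · have h1 := (List.pairwise_cons.mp hpw_rest).1 x h
        have h2 := hvalid x (by simp [h])
        omega
  obtain ⟨iA, iB, iC, iD1, iD2, iD3, iD4, iD5, iD6⟩ :=
    pvMwScan_spec e rest s s hwf_rest hbrest (le_refl s) (fun _ _ => Or.inr (le_of_lt hse))
  rw [hscan] at iA iB iC iD1 iD2 iD3 iD4 iD5 iD6
  dsimp only at iA iB iC iD1 iD2 iD3 iD4 iD5 iD6
  have hg : (if cur < e then gs ++ [(cur, e)] else gs)
      = gs ++ (if cur < e then [(cur, e)] else []) := by
    split <;> simp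
  have hcovbef : ∀ p, s ≤ p → pvCov bef p = false := by
    intro p hp
    rw [← Bool.not_eq_true]
    intro hc
    obtain ⟨g, hg', hg1, hg2⟩ := (pvCov_iff bef p).mp hc
    have := hbefore2 g hg'
    omega
  rw [hunf]
  dsimp only
  refine ⟨?_, ?_, ?_, ?_⟩
  · intro p
    rw [hg]
    rw [iA p]
    constructor
    · rintro ⟨h1, h2, h3⟩
      refine ⟨h1, h2, ?_⟩
      rw [hivs, pvCov_append, hcovbef p h1, h3]
      rfl
    · rintro ⟨h1, h2, h3⟩
      rw [hivs, pvCov_append, hcovbef p h1] at h3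
      simp at h3
      exact ⟨h1, h2, h3⟩
  · rw [hg]
    exact iB
  · intro p
    have h1 := iC p
    have hss : decide (s ≤ p ∧ p < s) = false := by simp
    rw [hss] at h1
    simp only [Bool.false_or] at h1
    rw [pvCov_append, pvCov_cons, h1, hivs, pvCov_append]
    rw [Bool.or_assoc]
  · constructor
    · rw [List.pairwise_append]
      refine ⟨hpw_bef, ?_, ?_⟩
      · rw [List.pairwise_cons]
        refine ⟨?_, iD1.1⟩
        intro y hy
        have := iD2 y hy
        simp only
        omega
      · intro x hx y hy
        have hx2 : x.2 < s := hbefore2 x hx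
        have hxrest : ∀ z ∈ rest, x.2 < z.1 := fun z hz => hcross x hx z hz
        rcases List.mem_cons.mp hy with h | h
        · rw [h]
          exact iD5 x.2 hx2 hxrest
        · exact hxrest y (iD6 y h)
    · intro x hx
      rcases List.mem_append.mp hx with h | h
      · exact hvalid x (by simp [h])
      · rcases List.mem_cons.mp h with h' | h'
        · rw [h']
          simp only
          omega
        · exact iD1.2 x h'

theorem pvFlat_eq_filter (ivs : List (Int × Int)) (s e : Int) (hwf : pvWF ivs) (hse : s < e) :
    pvFlat (pvMergeWindow ivs s e).1 =
      (PySem.List.pyRange s e 1).filter (fun p => !pvCov ivs p) := by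
  obtain ⟨h1, ⟨h2a, h2b⟩, _, _⟩ := pvMergeWindow_spec ivs s e hwf hse
  apply pvSortedExt
  · exact pvFlat_pairwise _ h2a
  · exact (PySem.List.pairwise_lt_pyRange_one s e).filter _
  · intro p
    rw [h1 p, List.mem_filter, PySem.List.mem_pyRange_one]
    constructor
    · rintro ⟨ha, hb, hc⟩
      exact ⟨⟨ha, hb⟩, by simp [hc]⟩
    · rintro ⟨⟨ha, hb⟩, hc⟩
      simp at hc
      exact ⟨ha, hb, hc⟩



theorem pvOuter_bisim (lines : List String) (radius : Int) : ∀ (idxs : List Int)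
    (sel : List String) (seen : PySem.Set Int) (ivs : List (Int × Int)) (rem : Int),
    1 ≤ rem → pvWF ivs → (∀ p, PySem.Set.contains seen p = pvCov ivs p) →
    (pvOuterA lines radius idxs (sel, seen, rem)).1 =
      (pvOuterB lines radius idxs (ivs, sel, rem)).2.1 := by
  intro idxs
  induction idxs with
  | nil =>
    intro sel seen ivs rem hrem hwf hcov
    simp [pvOuterA, pvOuterB]
  | cons i is ih =>
    intro sel seen ivs rem hrem hwf hcov
    have hrem0 : ¬ rem ≤ 0 := by omega
    by_cases he : min (lines.length : Int) (i + radius + 1) ≤ max 0 (i - radius)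
    · -- empty window: both sides skip
      have hA : pvOuterA lines radius (i :: is) (sel, seen, rem)
          = pvOuterA lines radius is (sel, seen, rem) := by
        rw [pvOuterA]
        rw [PySem.List.pyRange_one_eq_nil he]
        rw [show pvInnerA lines [] (sel, seen, rem) = (sel, seen, rem) from rfl]
        simp [hrem0]
      have hB : pvOuterB lines radius (i :: is) (ivs, sel, rem)
          = pvOuterB lines radius is (ivs, sel, rem) := by
        rw [pvOuterB]
        simp [hrem0, he]
      rw [hA, hB]
      exact ih sel seen ivs rem hrem hwf hcov
    · push_neg at he
      have hs0 : (0 : Int) ≤ max 0 (i - radius) := le_max_left _ _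
      have hen : min (lines.length : Int) (i + radius + 1) ≤ (lines.length : Int) := min_le_left _ _
      rcases hmw : pvMergeWindow ivs (max 0 (i - radius)) (min (lines.length : Int) (i + radius + 1))
        with ⟨gaps, ivs2⟩
      obtain ⟨iA, iB, iC, iWF⟩ := pvMergeWindow_spec ivs _ _ hwf he
      have hffilter := pvFlat_eq_filter ivs _ _ hwf he
      rw [hmw] at iA iB iC iWF hffilter
      dsimp only at iA iB iC iWF hffilter
      have hfc : (PySem.List.pyRange (max 0 (i - radius)) (min (lines.length : Int) (i + radius + 1)) 1).filter
            (fun p => !PySem.Set.contains seen p)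
          = (PySem.List.pyRange (max 0 (i - radius)) (min (lines.length : Int) (i + radius + 1)) 1).filter
            (fun p => !pvCov ivs p) := by
        apply List.filter_congr
        intro q _
        rw [hcov q]
      have hA : pvOuterA lines radius (i :: is) (sel, seen, rem)
          = (let st' := pvInnerA lines
              (PySem.List.pyRange (max 0 (i - radius)) (min (lines.length : Int) (i + radius + 1)) 1)
              (sel, seen, rem);
             if st'.2.2 ≤ 0 then st' else pvOuterA lines radius is st') := rfl
      rw [hA]
      rw [pvInnerA_spec lines _ sel seen rem hrem (PySem.List.nodup_pyRange_one _ _), hfc]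
      have hB : pvOuterB lines radius (i :: is) (ivs, sel, rem)
          = pvOuterB lines radius is (ivs2,
              (pvEmitB lines gaps (sel, rem)).1, (pvEmitB lines gaps (sel, rem)).2) := by
        rw [pvOuterB]
        simp only [hrem0, if_false, show ¬ (min (lines.length : Int) (i + radius + 1) ≤ max 0 (i - radius)) from by omega, if_false, hmw]
      rw [hB]
      rw [pvEmitB_spec lines gaps sel rem hrem
        (fun g hg => by
          obtain ⟨h1, h2, h3⟩ := iB.2 g hg
          exact ⟨by omega, h2, by omega⟩)]
      rw [hffilter]
      set u := (PySem.List.pyRange (max 0 (i - radius)) (min (lines.length : Int) (i + radius + 1)) 1).filter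
            (fun p => !pvCov ivs p) with hu
      set t := u.take rem.toNat with ht
      by_cases hstop : rem - (t.length : Int) ≤ 0
      · -- cap reached inside this window: both sides stop
        dsimp only
        rw [if_pos hstop]
        have hBstop : (pvOuterB lines radius is (ivs2, sel ++ t.map (pvGet lines), rem - (t.length : Int))).2.1
            = sel ++ t.map (pvGet lines) := by
          cases is with
          | nil => rfl
          | cons j js =>
            rw [pvOuterB]
            simp [hstop]
        rw [hBstop]
      · dsimp only
        rw [if_neg hstop]
        have htu : t = u := by
          rw [ht]
          apply List.take_of_length_le
          by_contra hlen
          push_neg at hlen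
          have : t.length = rem.toNat := by
            rw [ht, List.length_take]
            omega
          omega
        have hcov2 : ∀ p, PySem.Set.contains (seen ++ t) p = pvCov ivs2 p := by
          intro p
          have hsp : p ∈ seen ↔ pvCov ivs p = true := by
            rw [← hcov p]
            simp [PySem.Set.contains]
          have hup : p ∈ u ↔ (max 0 (i - radius) ≤ p ∧ p < min (lines.length : Int) (i + radius + 1)
              ∧ pvCov ivs p = false) := by
            rw [hu]
            simp [List.mem_filter, PySem.List.mem_pyRange_one]
            tauto
          rw [iC p]
          apply pvBoolIff
          rw [htu]
          simp only [Bool.or_eq_true, decide_eq_true_eq]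
          rw [show (PySem.Set.contains (seen ++ u) p = true) ↔ (p ∈ seen ∨ p ∈ u) from by
            simp [PySem.Set.contains]]
          rw [hsp, hup]
          cases hc : pvCov ivs p
          · simp [hc]
          · simp [hc]
        exact ih _ _ _ _ (by omega) iWF hcov2

theorem pvAlt_nonpos (lines : List String) (indexes : List Int) (radius : Int) (max_lines : Int)
    (h : max_lines ≤ 0) : render_line_windows_alt lines indexes radius max_lines = "" := by
  cases indexes with
  | nil => rfl
  | cons i is =>
    unfold render_line_windows_alt
    rw [pvOuterB]
    simp [h]
    rfl

theorem pvA_first (lines : List String) (radius max_lines i0 : Int) (rest : List Int)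
    (hml : max_lines ≤ 0)
    (hw : max 0 (i0 - radius) < min (lines.length : Int) (i0 + radius + 1)) :
    render_line_windows lines (i0 :: rest) radius max_lines
      = PySem.List.pyGetD lines (max 0 (i0 - radius)) "" := by
  have h1 : PySem.List.pyRange (max 0 (i0 - radius)) (min (lines.length : Int) (i0 + radius + 1)) 1
      = (max 0 (i0 - radius)) ::
        PySem.List.pyRange (max 0 (i0 - radius) + 1) (min (lines.length : Int) (i0 + radius + 1)) 1 :=
    PySem.List.pyRange_one_cons hw
  have h2 : pvInnerA lines
      ((max 0 (i0 - radius)) ::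
        PySem.List.pyRange (max 0 (i0 - radius) + 1) (min (lines.length : Int) (i0 + radius + 1)) 1)
      (([] : List String), (PySem.Set.empty : PySem.Set Int), max_lines)
      = ([PySem.List.pyGetD lines (max 0 (i0 - radius)) ""],
         PySem.Set.add PySem.Set.empty (max 0 (i0 - radius)), max_lines - 1) := by
    rw [pvInnerA]
    rw [show PySem.Set.contains (PySem.Set.empty : PySem.Set Int) (max 0 (i0 - radius)) = false from rfl]
    simp [show max_lines - 1 ≤ 0 from by omega]
  have h3 : pvOuterA lines radius (i0 :: rest)
      (([] : List String), (PySem.Set.empty : PySem.Set Int), max_lines)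
      = ([PySem.List.pyGetD lines (max 0 (i0 - radius)) ""],
         PySem.Set.add PySem.Set.empty (max 0 (i0 - radius)), max_lines - 1) := by
    rw [pvOuterA]
    rw [h1, h2]
    simp [show max_lines - 1 ≤ 0 from by omega]
  unfold render_line_windows
  rw [h3]
  simp [PySem.Str.join]

-- ===== VERDICT (by name: the statement is the Claim_ definition above) =====
theorem render_line_windows_spec : Claim_unchanged_render_line_windows := by
  intro lines indexes radius max_lines _hdom
  intro hnD
  by_cases hml : 1 ≤ max_lines
  · unfold render_line_windows render_line_windows_alt
    exact congrArg (PySem.Str.join "\n")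
      (pvOuter_bisim lines radius indexes [] PySem.Set.empty [] max_lines hml
        ⟨by simp, by simp⟩ (fun p => rfl))
  · have hml0 : max_lines ≤ 0 := by omega
    rw [pvAlt_nonpos lines indexes radius max_lines hml0]
    cases indexes with
    | nil => rfl
    | cons i0 rest =>
      by_cases hw : max 0 (i0 - radius) < min (lines.length : Int) (i0 + radius + 1)
      · have hg0 : PySem.List.pyGetD lines (max 0 (i0 - radius)) "" = "" := by
          by_contra hne
          exact hnD ⟨hml0, by simp, by simpa using hw, by simpa using hne⟩
        rw [pvA_first lines radius max_lines i0 rest hml0 hw, hg0]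
      · push_neg at hw
        have h2 : pvInnerA lines
            (PySem.List.pyRange (max 0 (i0 - radius)) (min (lines.length : Int) (i0 + radius + 1)) 1)
            (([] : List String), (PySem.Set.empty : PySem.Set Int), max_lines)
            = ([], PySem.Set.empty, max_lines) := by
          rw [PySem.List.pyRange_one_eq_nil hw]
          rfl
        unfold render_line_windows
        rw [pvOuterA, h2]
        simp [hml0]
        rfl

theorem render_line_windows_changed : Claim_changed_render_line_windows := by
  unfold Claim_changed_render_line_windows; decide

theorem render_line_windows_tight : Claim_exact_render_line_windows := by
  intro lines indexes radius max_lines _hdom hD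
  unfold D_render_line_windows at hD
  obtain ⟨hml, hne, hw, hgne⟩ := hD
  cases indexes with
  | nil => exact absurd rfl hne
  | cons i0 rest =>
    rw [pvAlt_nonpos lines (i0 :: rest) radius max_lines hml]
    rw [pvA_first lines radius max_lines i0 rest hml (by simpa using hw)]
    simpa using hgne
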